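-- pv_equiv track=rewrite | github.com/christofmuc/KnobKraft-orm | adaptations/Korg_Triton.py | unescapeSysex
-- ===== SOURCE A (Python) =====
-- from typing import List, Optional, Tuple
--
-- def unescapeSysex(sysex: List[int]) -> List[int]:
--     result = []
--     index = 0
--     while index < len(sysex):
--         msb = sysex[index]
--         index += 1
--         for bit in range(7):
--             if index < len(sysex):
--                 result.append(sysex[index] | (((msb >> bit) & 1) << 7))
--                 index += 1
--     return result
-- ===== SOURCE B (Python) =====
-- from typing import List
--
-- def unescapeSysex(sysex: List[int]) -> List[int]:
--     n = len(sysex)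
--     m = n - (n + 7) // 8  # total output bytes: drop one msb byte per (partial) 8-byte group
--     return [sysex[8 * (j // 7) + 1 + j % 7] | (((sysex[8 * (j // 7)] >> (j % 7)) & 1) << 7)
--             for j in range(m)]
-- ===== Notes on version B (the rewrite author's own statement) =====
-- stated objective: alternative
-- what changed: Replaced A's stateful nested loops (manual index walk with per-byte bounds checks) by a closed-form index mapping: the output length m = n - ceil(n/8) is computed arithmetically and each output byte j is produced independently from sysex[8*(j//7)] and sysex[8*(j//7)+1+j%7], with no loop state at all.
import Mathlib
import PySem

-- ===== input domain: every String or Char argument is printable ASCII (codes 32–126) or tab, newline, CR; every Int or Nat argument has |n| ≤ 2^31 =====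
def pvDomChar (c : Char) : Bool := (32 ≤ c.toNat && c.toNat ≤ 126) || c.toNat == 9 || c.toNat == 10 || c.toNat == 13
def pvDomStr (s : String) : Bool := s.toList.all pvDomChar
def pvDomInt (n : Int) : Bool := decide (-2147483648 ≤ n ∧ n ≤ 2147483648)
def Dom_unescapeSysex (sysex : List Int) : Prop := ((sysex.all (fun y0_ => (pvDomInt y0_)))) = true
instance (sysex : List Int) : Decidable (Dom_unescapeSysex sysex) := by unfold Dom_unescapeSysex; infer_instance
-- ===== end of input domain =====

-- B replaces A's stateful nested loops (manual index, per-byte bounds checks) by a closed-form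
-- index mapping: output length m = n - ceil(n/8), output byte j built directly from
-- sysex[8*(j//7)] and sysex[8*(j//7)+1+j%7] (alternative decomposition; same cost).

-- ===== PORT A =====
-- inner 'for bit in range(7)' loop: n counts the remaining iterations, bit is the loop variable;
-- the guarded sysex[index] (always in range here) is ported as getD with default 0.
def unescapeSysex_inner (sysex : List Int) (msb : Int) : Nat → Nat → Nat → List Int → Nat × List Int
  | 0, _, index, result => (index, result)
  | n + 1, bit, index, result =>
    if index < sysex.length then
      unescapeSysex_inner sysex msb n (bit + 1) (index + 1)
        (result ++ [PySem.Int.bor (sysex.getD index 0) ((PySem.Int.band (msb >>> bit) 1) <<< 7)])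
    else
      unescapeSysex_inner sysex msb n (bit + 1) index result

-- termination helper for the outer while loop: the inner loop never decreases the index
theorem unescapeSysex_inner_fst_le (sysex : List Int) (msb : Int) :
    ∀ (n bit index : Nat) (result : List Int),
      index ≤ (unescapeSysex_inner sysex msb n bit index result).1 := by
  intro n
  induction n with
  | zero => intro bit index result; simp [unescapeSysex_inner]
  | succ n ih =>
    intro bit index result
    simp only [unescapeSysex_inner]
    split
    · exact Nat.le_trans (Nat.le_succ index) (ih (bit + 1) (index + 1) _)
    · exact ih (bit + 1) index result

-- the 'while index < len(sysex)' loop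
def unescapeSysex_outer (sysex : List Int) (index : Nat) (result : List Int) : List Int :=
  if h : index < sysex.length then
    unescapeSysex_outer sysex
      (unescapeSysex_inner sysex (sysex.getD index 0) 7 0 (index + 1) result).1
      (unescapeSysex_inner sysex (sysex.getD index 0) 7 0 (index + 1) result).2
  else result
termination_by sysex.length - index
decreasing_by
  have := unescapeSysex_inner_fst_le sysex (sysex.getD index 0) 7 0 (index + 1) result
  omega

def unescapeSysex (sysex : List Int) : List Int :=
  unescapeSysex_outer sysex 0 []

-- ===== PORT B =====
-- list comprehension over range(m); the in-range indexing sysex[…] is ported as pyGetD with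
-- default 0 (the indices are always in range); the shift count j % 7 is nonnegative, so .toNat is exact.
def unescapeSysex_alt (sysex : List Int) : List Int :=
  let n : Int := sysex.length
  let m : Int := n - PySem.Int.floordiv (n + 7) 8
  (PySem.List.pyRange 0 m 1).map (fun j =>
    PySem.Int.bor
      (PySem.List.pyGetD sysex (8 * PySem.Int.floordiv j 7 + 1 + PySem.Int.mod j 7) 0)
      ((PySem.Int.band ((PySem.List.pyGetD sysex (8 * PySem.Int.floordiv j 7) 0) >>> (PySem.Int.mod j 7).toNat) 1) <<< 7))

-- ===== PRECONDITION & SPEC =====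
def Spec_unescapeSysex (sysex : List Int) (out : List Int) : Prop := out = unescapeSysex_alt sysex
instance (sysex : List Int) (out : List Int) : Decidable (Spec_unescapeSysex sysex out) := by unfold Spec_unescapeSysex; infer_instance

-- ===== CLAIM (what is proved, stated in full; the proofs are below) =====
def Claim_equal_unescapeSysex : Prop := ∀ (sysex : List Int), Dom_unescapeSysex sysex → Spec_unescapeSysex sysex (unescapeSysex sysex)

-- ===== LEMMAS AND PROOFS =====

-- common characterisation: decode one data chunk against msb, starting at bit position `bit`
def decBits (msb : Int) : Nat → List Int → List Int
  | _, [] => []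
  | bit, b :: bs => PySem.Int.bor b ((PySem.Int.band (msb >>> bit) 1) <<< 7) :: decBits msb (bit + 1) bs

-- common characterisation: the whole decode, 8-byte group by 8-byte group
def chunks : List Int → List Int
  | [] => []
  | msb :: rest => decBits msb 0 (rest.take 7) ++ chunks (rest.drop 7)
termination_by xs => xs.length
decreasing_by
  simp only [List.length_cons, List.length_drop]
  omega

theorem chunks_nil : chunks [] = [] := by rw [chunks]

theorem chunks_cons (m : Int) (rest : List Int) :
    chunks (m :: rest) = decBits m 0 (rest.take 7) ++ chunks (rest.drop 7) := by rw [chunks]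

theorem drop_min_length (xs : List Int) (n : Nat) : xs.drop (min xs.length n) = xs.drop n := by
  rcases Nat.le_total n xs.length with h | h
  · rw [Nat.min_eq_right h]
  · rw [Nat.min_eq_left h, List.drop_eq_nil_of_le h, List.drop_eq_nil_of_le (le_refl _)]

theorem unescapeSysex_inner_spec (sysex : List Int) (msb : Int) :
    ∀ (n bit index : Nat) (result : List Int), index ≤ sysex.length →
      unescapeSysex_inner sysex msb n bit index result =
        (min sysex.length (index + n), result ++ decBits msb bit ((sysex.drop index).take n)) := by
  intro n
  induction n with
  | zero =>
    intro bit index result h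
    simp [unescapeSysex_inner, decBits, Nat.min_eq_right h]
  | succ n ih =>
    intro bit index result h
    simp only [unescapeSysex_inner]
    split
    · rename_i hidx
      rw [ih (bit + 1) (index + 1) _ (by omega)]
      rw [List.drop_eq_getElem_cons hidx, List.take_succ_cons]
      simp only [decBits, List.getD_eq_getElem?_getD, List.getElem?_eq_getElem hidx,
        Option.getD_some, List.append_assoc, List.singleton_append]
      have harith : index + 1 + n = index + (n + 1) := by omega
      rw [harith]
    · rename_i hidx
      have hix : index = sysex.length := by omega
      rw [ih (bit + 1) index result h]
      rw [hix, List.drop_length]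
      simp only [List.take_nil, decBits, List.append_nil, Prod.mk.injEq]
      exact ⟨by omega, trivial⟩

theorem unescapeSysex_outer_spec (sysex : List Int) :
    ∀ (k index : Nat) (result : List Int), sysex.length - index ≤ k → index ≤ sysex.length →
      unescapeSysex_outer sysex index result = result ++ chunks (sysex.drop index) := by
  intro k
  induction k with
  | zero =>
    intro index result hk h
    have hix : index = sysex.length := by omega
    rw [unescapeSysex_outer]
    simp [hix, List.drop_length, chunks_nil]
  | succ k ih =>
    intro index result hk h
    rw [unescapeSysex_outer]
    split
    · rename_i hidx
      rw [unescapeSysex_inner_spec sysex _ 7 0 (index + 1) result (by omega)]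
      rw [ih (min sysex.length (index + 1 + 7)) _ (by omega) (by omega)]
      rw [drop_min_length]
      rw [List.drop_eq_getElem_cons hidx]
      rw [chunks_cons]
      simp only [List.getD_eq_getElem?_getD, List.getElem?_eq_getElem hidx,
        Option.getD_some, List.append_assoc]
      have hdd : (sysex.drop (index + 1)).drop 7 = sysex.drop (index + 1 + 7) := by
        rw [List.drop_drop]
      rw [hdd]
    · rename_i hidx
      have hix : index = sysex.length := by omega
      simp [hix, List.drop_length, chunks_nil]

theorem unescapeSysex_eq_chunks (sysex : List Int) : unescapeSysex sysex = chunks sysex := by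
  have := unescapeSysex_outer_spec sysex sysex.length 0 [] (by omega) (by omega)
  simpa [unescapeSysex] using this

-- ===== B side: the closed-form mapping, restated over Nat =====

-- output byte j as B computes it, with Nat index arithmetic
def bFun (xs : List Int) (j : Nat) : Int :=
  PySem.Int.bor (xs.getD (8 * (j / 7) + 1 + j % 7) 0)
    ((PySem.Int.band ((xs.getD (8 * (j / 7)) 0) >>> (j % 7)) 1) <<< 7)

-- output length as B computes it, over Nat
def bLen (xs : List Int) : Nat := xs.length - (xs.length + 7) / 8

theorem floordiv_natCast7 (k : Nat) : PySem.Int.floordiv (k : Int) 7 = ((k / 7 : Nat) : Int) := by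
  exact_mod_cast PySem.Int.floordiv_natCast k 7

theorem mod_natCast7 (k : Nat) : PySem.Int.mod (k : Int) 7 = ((k % 7 : Nat) : Int) := by
  exact_mod_cast PySem.Int.mod_natCast k 7

-- one output element of the B port equals the Nat-indexed closed form
theorem alt_elem (sysex : List Int) (k : Nat) :
    PySem.Int.bor
      (PySem.List.pyGetD sysex (8 * PySem.Int.floordiv (k : Int) 7 + 1 + PySem.Int.mod (k : Int) 7) 0)
      ((PySem.Int.band ((PySem.List.pyGetD sysex (8 * PySem.Int.floordiv (k : Int) 7) 0) >>> (PySem.Int.mod (k : Int) 7).toNat) 1) <<< 7)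
    = bFun sysex k := by
  rw [floordiv_natCast7, mod_natCast7]
  rw [show (8 : Int) * ((k / 7 : Nat) : Int) + 1 + ((k % 7 : Nat) : Int)
      = (((8 * (k / 7) + 1 + k % 7 : Nat)) : Int) by push_cast; ring]
  rw [show (8 : Int) * ((k / 7 : Nat) : Int) = (((8 * (k / 7) : Nat)) : Int) by push_cast; ring]
  rw [PySem.List.pyGetD_natCast, PySem.List.pyGetD_natCast, Int.toNat_natCast]
  rfl

theorem alt_eq_map (sysex : List Int) :
    unescapeSysex_alt sysex = (List.range (bLen sysex)).map (bFun sysex) := by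
  unfold unescapeSysex_alt
  have hm : ((sysex.length : Int) - PySem.Int.floordiv ((sysex.length : Int) + 7) 8)
      = ((bLen sysex : Nat) : Int) := by
    have h8 : ((sysex.length : Int) + 7) = (((sysex.length + 7 : Nat)) : Int) := by push_cast; ring
    rw [h8]
    rw [show PySem.Int.floordiv (((sysex.length + 7 : Nat)) : Int) 8
        = (((sysex.length + 7) / 8 : Nat) : Int) from
      by exact_mod_cast PySem.Int.floordiv_natCast (sysex.length + 7) 8]
    unfold bLen
    have : (sysex.length + 7) / 8 ≤ sysex.length := by omega
    push_cast [this]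
    ring
  simp only [hm]
  rw [PySem.List.pyRange_one]
  have ht : (((bLen sysex : Nat) : Int) - 0).toNat = bLen sysex := by omega
  rw [ht, List.map_map]
  apply List.map_congr_left
  intro k _
  simp only [Function.comp_apply, zero_add]
  exact alt_elem sysex k

-- decBits as a range-map
theorem decBits_eq_map (m : Int) :
    ∀ (bs : List Int) (s : Nat),
      decBits m s bs = (List.range bs.length).map
        (fun j => PySem.Int.bor (bs.getD j 0) ((PySem.Int.band (m >>> (s + j)) 1) <<< 7)) := by
  intro bs
  induction bs with
  | nil => intro s; simp [decBits]
  | cons b bs ih =>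
    intro s
    simp only [decBits, List.length_cons, List.range_succ_eq_map, List.map_cons, List.map_map]
    congr 1
    rw [ih (s + 1)]
    apply List.map_congr_left
    intro j _
    simp only [Function.comp_apply, Nat.succ_eq_add_one, List.getD_eq_getElem?_getD,
      List.getElem?_cons_succ]
    rw [show s + (j + 1) = s + 1 + j by omega]

-- shифting the closed form one full 8-byte group down
theorem bFun_shift (xs : List Int) (j : Nat) : bFun xs (7 + j) = bFun (xs.drop 8) j := by
  unfold bFun
  have hdiv : (7 + j) / 7 = 1 + j / 7 := by omega
  have hmod : (7 + j) % 7 = j % 7 := by omega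
  rw [hdiv, hmod]
  have hgd : ∀ (k : Nat), (xs.drop 8).getD k 0 = xs.getD (8 + k) 0 := by
    intro k
    simp [List.getD_eq_getElem?_getD, List.getElem?_drop]
  rw [hgd (8 * (j / 7) + 1 + j % 7), hgd (8 * (j / 7))]
  have h1 : 8 + (8 * (j / 7) + 1 + j % 7) = 8 * (1 + j / 7) + 1 + j % 7 := by ring
  have h2 : 8 + 8 * (j / 7) = 8 * (1 + j / 7) := by ring
  rw [h1, h2]

theorem map_range_bFun_eq_chunks :
    ∀ (xs : List Int), (List.range (bLen xs)).map (bFun xs) = chunks xs := by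
  intro xs
  induction hn : xs.length using Nat.strong_induction_on generalizing xs with
  | _ n ih =>
  match xs with
  | [] => simp [bLen, chunks_nil]
  | msb :: rest =>
    rw [chunks_cons]
    by_cases hr : rest.length < 7
    · have hM : bLen (msb :: rest) = rest.length := by
        unfold bLen; simp only [List.length_cons]; omega
      have htk : rest.take 7 = rest := List.take_of_length_le (by omega)
      have hdp : rest.drop 7 = [] := List.drop_eq_nil_of_le (by omega)
      rw [hM, htk, hdp, chunks_nil, List.append_nil, decBits_eq_map]
      apply List.map_congr_left
      intro j hj
      rw [List.mem_range] at hj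
      unfold bFun
      have hd : j / 7 = 0 := Nat.div_eq_of_lt (by omega)
      have hm : j % 7 = j := Nat.mod_eq_of_lt (by omega)
      rw [hd, hm]
      simp only [Nat.mul_zero, List.getD_cons_zero, zero_add]
      rw [show 0 + 1 + j = j + 1 by omega, List.getD_cons_succ]
    · -- full first group: split off the first 7 output bytes
      have hM : bLen (msb :: rest) = 7 + bLen ((msb :: rest).drop 8) := by
        unfold bLen
        simp only [List.length_drop, List.length_cons]
        omega
      rw [hM, List.range_add, List.map_append, List.map_map]
      have hfst : (List.range 7).map (bFun (msb :: rest)) = decBits msb 0 (rest.take 7) := by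
        rw [decBits_eq_map]
        have hlt : (rest.take 7).length = 7 := by simp; omega
        rw [hlt]
        apply List.map_congr_left
        intro j hj
        rw [List.mem_range] at hj
        unfold bFun
        have hd : j / 7 = 0 := Nat.div_eq_of_lt (by omega)
        have hm : j % 7 = j := Nat.mod_eq_of_lt (by omega)
        rw [hd, hm]
        simp only [Nat.mul_zero, List.getD_cons_zero, zero_add]
        rw [show 0 + 1 + j = j + 1 by omega, List.getD_cons_succ]
        have : rest.getD j 0 = (rest.take 7).getD j 0 := by
          simp [List.getD_eq_getElem?_getD, List.getElem?_take_of_lt, hj]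
        rw [this]
      have hsnd : (List.range (bLen ((msb :: rest).drop 8))).map (bFun (msb :: rest) ∘ (fun x => 7 + x))
          = chunks (rest.drop 7) := by
        have hcomp : (bFun (msb :: rest) ∘ (fun x => 7 + x)) = bFun ((msb :: rest).drop 8) := by
          funext j
          exact bFun_shift (msb :: rest) j
        rw [hcomp]
        have hdd : (msb :: rest).drop 8 = rest.drop 7 := by
          simp [List.drop_succ_cons]
        rw [hdd]
        refine ih (rest.drop 7).length ?_ (rest.drop 7) rfl
        have h1 := hn
        simp only [List.length_cons] at h1
        simp only [List.length_drop]
        omega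
      rw [hfst, hsnd]

theorem alt_eq_chunks (sysex : List Int) : unescapeSysex_alt sysex = chunks sysex := by
  rw [alt_eq_map, map_range_bFun_eq_chunks]

-- ===== VERDICT (by name: the statement is the Claim_ definition above) =====
theorem unescapeSysex_spec : Claim_equal_unescapeSysex := by
  intro sysex _
  unfold Spec_unescapeSysex
  rw [unescapeSysex_eq_chunks, alt_eq_chunks]
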